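-- pv_equiv track=rewrite | github.com/zsturdevant/Williams-projects | bedtime.py | bedtimeStory
-- ===== SOURCE A (Python) =====
-- def firstSentence(object, subject):
--     """Given the strings object and subject, return a string representing the
--     first sentence of the story about those characters."""
--     return  "The mother of the " + object + " told " + \
--             "a story about a " + subject + "..."
--
-- def lastSentence(object):
--     """Given the string object, return a string representing the second (last)
--     sentence of the story about that character."""
--     return "and then the " + object + " fell asleep."
--
-- def bedtimeStory(characters):
--     """
--     Main (recursive) function for producing a bedtime story based on a list of
--     strings (story characters). Returns a list of strings where each element is
--     a sentence in the bedtime story.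
--
--     >>> bedtimeStory(['ant', 'fly'])
--     ['The mother of the ant told a story about a fly...', 'and then the ant fell asleep.']
--
--     >>> bedtimeStory(['ant', 'fly', 'chicken', 'pig', 'monkey'])
--     ['The mother of the ant told a story about a fly...', 'The mother of the fly told a story about a chicken...', 'The mother of the chicken told a story about a pig...', 'The mother of the pig told a story about a monkey...', 'and then the pig fell asleep.', 'and then the chicken fell asleep.', 'and then the fly fell asleep.', 'and then the ant fell asleep.']
--     """
--     story = []
--     if len(characters) <= 1:
--         return[]
--     else:
--         char1 = characters[0]
--         char2 = characters[1]
--         story.append(firstSentence(char1, char2))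
--         story.extend(bedtimeStory(characters[1:]))
--         story.append(lastSentence(char1))
--         # takes first two characters and makes inserts them into first sentence
--         # which is added to story then repeats this process with a new list of characters
--         # starting with character 2 until there is only 1 character left then
--         # ends the story with last sentence
--
--     return story
-- ===== SOURCE B (Python) =====
-- def firstSentence(object, subject):
--     return  "The mother of the " + object + " told " + \
--             "a story about a " + subject + "..."
--
-- def lastSentence(object):
--     return "and then the " + object + " fell asleep."
--
-- def bedtimeStory(characters):
--     """Iterative O(n): one forward zip pass for the first sentences, one
--     reverse pass over all but the last character for the last sentences."""
--     if len(characters) <= 1: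
--         return []
--     firsts = [firstSentence(a, b) for a, b in zip(characters, characters[1:])]
--     lasts = [lastSentence(c) for c in reversed(characters[:-1])]
--     return firsts + lasts
-- ===== Notes on version B (the rewrite author's own statement) =====
-- stated objective: faster
-- what changed: Replaced the O(n^2) recursion with repeated list slicing by two linear passes: a forward zip building all first sentences and a reverse pass over characters[:-1] building the last sentences.
import Mathlib
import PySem

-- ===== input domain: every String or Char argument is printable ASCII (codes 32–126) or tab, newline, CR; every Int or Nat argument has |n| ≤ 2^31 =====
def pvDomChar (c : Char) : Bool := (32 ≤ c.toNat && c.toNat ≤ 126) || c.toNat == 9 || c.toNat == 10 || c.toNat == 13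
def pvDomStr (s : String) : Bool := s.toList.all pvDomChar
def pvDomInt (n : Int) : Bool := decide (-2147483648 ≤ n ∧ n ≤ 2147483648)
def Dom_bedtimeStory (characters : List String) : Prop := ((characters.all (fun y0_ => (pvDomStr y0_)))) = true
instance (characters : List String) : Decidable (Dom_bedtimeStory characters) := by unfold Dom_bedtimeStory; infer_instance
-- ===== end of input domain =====

-- B replaces A's O(n^2) slicing recursion by two linear passes (zip forward, reverse map); proved equal on all inputs.


-- ===== PORT A =====
def firstSentenceA (object subject : String) : String :=
  "The mother of the " ++ object ++ " told " ++ "a story about a " ++ subject ++ "..."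

def lastSentenceA (object : String) : String :=
  "and then the " ++ object ++ " fell asleep."

-- recursion on the list; characters[1:] is the tail (c2 :: rest)
def bedtimeStory (characters : List String) : List String :=
  match characters with
  | [] => []
  | [_] => []
  | c1 :: c2 :: rest =>
      (firstSentenceA c1 c2 :: bedtimeStory (c2 :: rest)) ++ [lastSentenceA c1]

-- ===== PORT B =====
def firstSentenceB (object subject : String) : String :=
  "The mother of the " ++ object ++ " told " ++ "a story about a " ++ subject ++ "..."

def lastSentenceB (object : String) : String :=
  "and then the " ++ object ++ " fell asleep."

-- zip(characters, characters[1:]) → zipWith; reversed(characters[:-1]) → dropLast.reverse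
def bedtimeStory_alt (characters : List String) : List String :=
  if characters.length ≤ 1 then []
  else
    (List.zipWith firstSentenceB characters characters.tail)
      ++ (characters.dropLast.reverse.map lastSentenceB)

-- ===== PRECONDITION & SPEC =====
def Spec_bedtimeStory (characters : List String) (out : List String) : Prop := out = bedtimeStory_alt characters
instance (characters : List String) (out : List String) : Decidable (Spec_bedtimeStory characters out) := by unfold Spec_bedtimeStory; infer_instance

-- ===== CLAIM (what is proved, stated in full; the proofs are below) =====
def Claim_equal_bedtimeStory : Prop := ∀ (characters : List String), Dom_bedtimeStory characters → Spec_bedtimeStory characters (bedtimeStory characters)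

-- ===== LEMMAS AND PROOFS =====
theorem bedtimeStory_eq_alt : ∀ (cs : List String), bedtimeStory cs = bedtimeStory_alt cs
  | [] => by simp [bedtimeStory, bedtimeStory_alt]
  | [_] => by simp [bedtimeStory, bedtimeStory_alt]
  | c1 :: c2 :: rest => by
    have ih := bedtimeStory_eq_alt (c2 :: rest)
    cases rest with
    | nil => simp [bedtimeStory, bedtimeStory_alt, firstSentenceA, firstSentenceB,
        lastSentenceA, lastSentenceB]
    | cons c3 rs =>
      show (firstSentenceA c1 c2 :: bedtimeStory (c2 :: c3 :: rs)) ++ [lastSentenceA c1]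
          = bedtimeStory_alt (c1 :: c2 :: c3 :: rs)
      rw [ih]
      simp [bedtimeStory_alt, firstSentenceA, firstSentenceB, lastSentenceA, lastSentenceB,
        List.dropLast_cons₂, List.append_assoc]

-- ===== VERDICT (by name: the statement is the Claim_ definition above) =====
theorem bedtimeStory_spec : Claim_equal_bedtimeStory := by
  intro cs _
  exact bedtimeStory_eq_alt cs
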